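-- pv_equiv track=rewrite | github.com/iwkiwk/nlp-course | 18-11-25/edit_dis.py | get_edit_dis2
-- ===== SOURCE A (Python) =====
-- def get_edit_dis2(str1, str2):
--     m = len(str1)
--     n = len(str2)
--     dp = [[0 for i in range(n + 1)] for j in range(m + 1)]
--     for i in range(m + 1):
--         for j in range(n + 1):
--
--             if i == 0:
--                 dp[i][j] = j
--
--             elif j == 0:
--                 dp[i][j] = i
--
--             elif str1[i - 1] == str2[j - 1]:
--                 dp[i][j] = dp[i - 1][j - 1]
--
--             else:
--                 dp[i][j] = min(dp[i][j - 1] + 1,  # Insert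
--                                dp[i - 1][j] + 1,  # Remove
--                                dp[i - 1][j - 1] + 2)  # Replace
--
--     return dp[m][n]
-- ===== SOURCE B (Python) =====
-- def get_edit_dis2(str1, str2):
--     # Edit distance with replace cost 2 equals len1 + len2 - 2*LCS(str1, str2):
--     # a cost-2 replace is never cheaper than an insert+delete pair, so the
--     # distance is determined by the longest common subsequence.
--     prev = [0] * (len(str2) + 1)
--     for c in str1:
--         cur = [0]
--         left = 0
--         for d, diag, up in zip(str2, prev, prev[1:]):
--             left = diag + 1 if c == d else max(left, up)
--             cur.append(left)
--         prev = cur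
--     return len(str1) + len(str2) - 2 * prev[-1]
-- ===== Notes on version B (the rewrite author's own statement) =====
-- stated objective: faster
-- what changed: Replaces the full (m+1)x(n+1) edit-distance table by a rolling single-row LCS computation, using the identity distance = len1+len2-2*LCS which holds because a replace costs 2 (an insert+delete pair).
import Mathlib
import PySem

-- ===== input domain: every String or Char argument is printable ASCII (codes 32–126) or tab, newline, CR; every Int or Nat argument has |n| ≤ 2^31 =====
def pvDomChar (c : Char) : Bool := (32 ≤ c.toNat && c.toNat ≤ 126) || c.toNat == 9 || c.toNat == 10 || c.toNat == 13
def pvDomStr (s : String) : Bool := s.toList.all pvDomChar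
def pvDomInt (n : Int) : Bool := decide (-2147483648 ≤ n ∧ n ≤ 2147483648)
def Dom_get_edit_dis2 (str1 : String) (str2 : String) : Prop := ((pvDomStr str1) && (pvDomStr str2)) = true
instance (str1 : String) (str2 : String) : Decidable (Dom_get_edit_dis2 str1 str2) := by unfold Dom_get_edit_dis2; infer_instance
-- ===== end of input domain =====

-- B replaces A's full (m+1)x(n+1) edit-distance table by a rolling single-row LCS
-- computation, using distance = m + n - 2*LCS (valid because a replace costs 2);
-- objective: alternative algorithm.

-- ===== PORT A =====
-- dp[i][j] read / write on the nested list (A's indices are always in range)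
def pvGet2 (dp : List (List Int)) (i j : Nat) : Int := (dp.getD i []).getD j 0
def pvSet2 (dp : List (List Int)) (i j : Nat) (v : Int) : List (List Int) :=
  dp.set i ((dp.getD i []).set j v)


def get_edit_dis2 (str1 : String) (str2 : String) : Int :=
  let s := str1.toList
  let t := str2.toList
  let m := s.length
  let n := t.length
  let dp0 : List (List Int) :=
    (List.range (m + 1)).map (fun _ => (List.range (n + 1)).map (fun _ => (0 : Int)))
  let dp :=
    (List.range (m + 1)).foldl (fun dp i =>
      (List.range (n + 1)).foldl (fun dp j =>
        if i = 0 then pvSet2 dp i j (j : Int)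
        else if j = 0 then pvSet2 dp i j (i : Int)
        else if s.getD (i - 1) ' ' = t.getD (j - 1) ' ' then
          pvSet2 dp i j (pvGet2 dp (i - 1) (j - 1))
        else
          pvSet2 dp i j (min (min (pvGet2 dp i (j - 1) + 1)
                                  (pvGet2 dp (i - 1) j + 1))
                             (pvGet2 dp (i - 1) (j - 1) + 2))
        ) dp) dp0
  pvGet2 dp m n

-- ===== PORT B =====
def get_edit_dis2_alt (str1 : String) (str2 : String) : Int :=
  let s := str1.toList
  let t := str2.toList
  let prevF :=
    s.foldl (fun prev c =>
      let z := t.zip (prev.zip prev.tail)       -- zip(str2, prev, prev[1:])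
      let r :=
        z.foldl (fun (p : Int × List Int) dd =>
          let left' := if c = dd.1 then dd.2.1 + 1 else max p.1 dd.2.2
          (left', p.2 ++ [left'])) ((0 : Int), ([0] : List Int))
      r.2) (List.replicate (t.length + 1) (0 : Int))
  (s.length : Int) + (t.length : Int) - 2 * prevF.getLastD 0

-- ===== PRECONDITION & SPEC =====
def Spec_get_edit_dis2 (str1 : String) (str2 : String) (out : Int) : Prop := out = get_edit_dis2_alt str1 str2
instance (str1 : String) (str2 : String) (out : Int) : Decidable (Spec_get_edit_dis2 str1 str2 out) := by unfold Spec_get_edit_dis2; infer_instance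

-- ===== CLAIM (what is proved, stated in full; the proofs are below) =====
def Claim_equal_get_edit_dis2 : Prop := ∀ (str1 : String) (str2 : String), Dom_get_edit_dis2 str1 str2 → Spec_get_edit_dis2 str1 str2 (get_edit_dis2 str1 str2)

-- ===== LEMMAS AND PROOFS =====

-- Reference functions: LCS length and cost-2 edit distance, recursing on the front.
def pvL : List Char → List Char → Int
  | [], _ => 0
  | _ :: _, [] => 0
  | a :: s, b :: t =>
      if a = b then pvL s t + 1 else max (pvL (a :: s) t) (pvL s (b :: t))
termination_by s t => s.length + t.length

def pvE : List Char → List Char → Int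
  | [], t => (t.length : Int)
  | a :: s, [] => ((a :: s).length : Int)
  | a :: s, b :: t =>
      if a = b then pvE s t
      else min (min (pvE (a :: s) t + 1) (pvE s (b :: t) + 1)) (pvE s t + 2)
termination_by s t => s.length + t.length

theorem pvL_nil_right (s : List Char) : pvL s [] = 0 := by cases s <;> simp [pvL]

theorem pvL_facts (N : Nat) : ∀ s t : List Char, s.length + t.length = N →
    (∀ a, pvL s t ≤ pvL (a :: s) t) ∧ (∀ b, pvL s t ≤ pvL s (b :: t)) ∧
    (∀ a, pvL (a :: s) t ≤ pvL s t + 1) ∧ (∀ b, pvL s (b :: t) ≤ pvL s t + 1) := by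
  induction N using Nat.strong_induction_on with
  | _ N ih =>
  intro s t hlen
  have key : ∀ (s' t' : List Char), s'.length + t'.length < N →
      (∀ a, pvL s' t' ≤ pvL (a :: s') t') ∧ (∀ b, pvL s' t' ≤ pvL s' (b :: t')) ∧
      (∀ a, pvL (a :: s') t' ≤ pvL s' t' + 1) ∧ (∀ b, pvL s' (b :: t') ≤ pvL s' t' + 1) :=
    fun s' t' h => ih _ h s' t' rfl
  refine ⟨?_, ?_, ?_, ?_⟩
  · -- M1
    intro a
    cases t with
    | nil => simp [pvL_nil_right]
    | cons b t' =>
      by_cases hab : a = b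
      · have h4 := (key s t' (by simp at hlen ⊢; omega)).2.2.2 b
        simp only [pvL, if_pos hab]
        omega
      · simp only [pvL, if_neg hab]
        exact le_max_right _ _
  · -- M2
    intro b
    cases s with
    | nil => simp [pvL]
    | cons a s' =>
      by_cases hab : a = b
      · have h3 := (key s' t (by simp at hlen ⊢; omega)).2.2.1 a
        simp only [pvL, if_pos hab]
        omega
      · simp only [pvL, if_neg hab]
        exact le_max_left _ _
  · -- M3
    intro a
    cases t with
    | nil => simp [pvL_nil_right]
    | cons b t' =>
      have hsz : s.length + t'.length < N := by simp at hlen ⊢; omega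
      by_cases hab : a = b
      · have h2 := (key s t' hsz).2.1 b
        simp only [pvL, if_pos hab]
        omega
      · have h3 := (key s t' hsz).2.2.1 a
        have h2 := (key s t' hsz).2.1 b
        simp only [pvL, if_neg hab]
        omega
  · -- M4
    intro b
    cases s with
    | nil => simp [pvL]
    | cons a s' =>
      have hsz : s'.length + t.length < N := by simp at hlen ⊢; omega
      by_cases hab : a = b
      · have h1 := (key s' t hsz).1 a
        simp only [pvL, if_pos hab]
        omega
      · have h4 := (key s' t hsz).2.2.2 b
        have h1 := (key s' t hsz).1 a
        simp only [pvL, if_neg hab]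
        omega

theorem pvE_eq_lengths_sub_two_pvL (N : Nat) : ∀ s t : List Char, s.length + t.length = N →
    pvE s t = (s.length : Int) + (t.length : Int) - 2 * pvL s t := by
  induction N using Nat.strong_induction_on with
  | _ N ih =>
  intro s t hlen
  cases s with
  | nil => simp [pvE, pvL]
  | cons a s' =>
    cases t with
    | nil => simp [pvE, pvL_nil_right]
    | cons b t' =>
      by_cases hab : a = b
      · have h := ih (s'.length + t'.length) (by simp at hlen ⊢; omega) s' t' rfl
        simp only [pvE, pvL, if_pos hab]
        simp [h]
        ring
      · have h1 := ih ((a::s').length + t'.length) (by simp at hlen ⊢; omega) (a::s') t' rfl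
        have h2 := ih (s'.length + (b::t').length) (by simp at hlen ⊢; omega) s' (b::t') rfl
        have h3 := ih (s'.length + t'.length) (by simp at hlen ⊢; omega) s' t' rfl
        have m1 : pvL s' t' ≤ pvL (a :: s') t' := (pvL_facts _ s' t' rfl).1 a
        have m2 : pvL s' t' ≤ pvL s' (b :: t') := (pvL_facts _ s' t' rfl).2.1 b
        simp only [pvE, pvL, if_neg hab]
        simp only [List.length_cons] at *
        push_cast at *
        omega

theorem getD_set_ne {α} (l : List α) (i j : Nat) (v d : α) (h : i ≠ j) :
    (l.set i v).getD j d = l.getD j d := by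
  simp [List.getD, List.getElem?_set_ne h]

theorem getD_set_self {α} (l : List α) (i : Nat) (v d : α) (h : i < l.length) :
    (l.set i v).getD i d = v := by
  simp [List.getD, List.getElem?_set_self h]

theorem pvSet2_length (dp : List (List Int)) (i j : Nat) (v : Int) :
    (pvSet2 dp i j v).length = dp.length := by simp [pvSet2]

theorem pvSet2_rowlen (dp : List (List Int)) (i j : Nat) (v : Int) (k : Nat) :
    ((pvSet2 dp i j v).getD k []).length = (dp.getD k []).length := by
  by_cases hk : i = k
  · subst hk
    by_cases hi : i < dp.length
    · rw [pvSet2, getD_set_self _ _ _ _ hi]; simp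
    · rw [pvSet2, List.set_eq_of_length_le (by omega)]
  · rw [pvSet2, getD_set_ne _ _ _ _ _ hk]

theorem pvGet2_set_ne_row (dp : List (List Int)) (i j k l : Nat) (v : Int) (h : k ≠ i) :
    pvGet2 (pvSet2 dp i j v) k l = pvGet2 dp k l := by
  rw [pvGet2, pvSet2, getD_set_ne _ _ _ _ _ (Ne.symm h)]; rfl

theorem pvGet2_set_ne_col (dp : List (List Int)) (i j l : Nat) (v : Int) (h : l ≠ j) :
    pvGet2 (pvSet2 dp i j v) i l = pvGet2 dp i l := by
  by_cases hi : i < dp.length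
  · rw [pvGet2, pvSet2, getD_set_self _ _ _ _ hi, getD_set_ne _ _ _ _ _ (Ne.symm h)]; rfl
  · rw [pvGet2, pvSet2, List.set_eq_of_length_le (by omega)]; rfl

theorem pvGet2_set_self (dp : List (List Int)) (i j : Nat) (v : Int)
    (hi : i < dp.length) (hj : j < (dp.getD i []).length) :
    pvGet2 (pvSet2 dp i j v) i j = v := by
  rw [pvGet2, pvSet2, getD_set_self _ _ _ _ hi, getD_set_self _ _ _ _ hj]

def pvDr (s t : List Char) (i j : Nat) : Int := pvE ((s.take i).reverse) ((t.take j).reverse)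
def pvLr (s t : List Char) (i j : Nat) : Int := pvL ((s.take i).reverse) ((t.take j).reverse)

theorem take_succ_reverse {α} (l : List α) (i : Nat) (h : i < l.length) :
    (l.take (i + 1)).reverse = l[i] :: (l.take i).reverse := by
  rw [← List.take_append_getElem h]; simp

theorem pvDr_zero_left (s t : List Char) (j : Nat) (hj : j ≤ t.length) :
    pvDr s t 0 j = (j : Int) := by
  simp [pvDr, pvE]; omega

theorem pvE_nil_right (s : List Char) : pvE s [] = (s.length : Int) := by
  cases s <;> simp [pvE]

theorem pvDr_zero_right (s t : List Char) (i : Nat) (hi : i ≤ s.length) :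
    pvDr s t i 0 = (i : Int) := by
  simp [pvDr, pvE_nil_right]; omega

theorem pvDr_succ_succ (s t : List Char) (i j : Nat) (hi : i < s.length) (hj : j < t.length) :
    pvDr s t (i + 1) (j + 1) =
      if s[i] = t[j] then pvDr s t i j
      else min (min (pvDr s t (i + 1) j + 1) (pvDr s t i (j + 1) + 1)) (pvDr s t i j + 2) := by
  simp only [pvDr]
  rw [take_succ_reverse s i hi, take_succ_reverse t j hj, pvE]

theorem pvLr_zero_left (s t : List Char) (j : Nat) : pvLr s t 0 j = 0 := by
  simp [pvLr, pvL]

theorem pvLr_zero_right (s t : List Char) (i : Nat) : pvLr s t i 0 = 0 := by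
  simp [pvLr, pvL_nil_right]

theorem pvLr_succ_succ (s t : List Char) (i j : Nat) (hi : i < s.length) (hj : j < t.length) :
    pvLr s t (i + 1) (j + 1) =
      if s[i] = t[j] then pvLr s t i j + 1
      else max (pvLr s t (i + 1) j) (pvLr s t i (j + 1)) := by
  simp only [pvLr]
  rw [take_succ_reverse s i hi, take_succ_reverse t j hj, pvL]

theorem foldl_range_inv {α : Type} (f : α → Nat → α) (P : Nat → α → Prop) (N : Nat) (a0 : α)
    (h0 : P 0 a0) (hstep : ∀ k a, k < N → P k a → P (k + 1) (f a k)) :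
    P N ((List.range N).foldl f a0) := by
  induction N with
  | zero => simpa using h0
  | succ N ih =>
    rw [List.range_succ, List.foldl_append]
    exact hstep _ _ (Nat.lt_succ_self N) (ih (fun k a hk => hstep k a (by omega)))

theorem foldl_idx_inv {α β : Type} (l : List β) (f : α → β → α) (P : Nat → α → Prop) (a0 : α)
    (h0 : P 0 a0) (hstep : ∀ k a (h : k < l.length), P k a → P (k + 1) (f a l[k])) :
    P l.length (l.foldl f a0) := by
  induction l generalizing P a0 with
  | nil => simpa using h0
  | cons b l' ih =>
    rw [List.foldl_cons, List.length_cons]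
    exact ih (fun k => P (k + 1)) (f a0 b) (hstep 0 a0 (by simp) h0)
      (fun k a hk hP => hstep (k + 1) a (by simpa using hk) hP)

theorem portA_eq (str1 str2 : String) :
    get_edit_dis2 str1 str2 =
      pvDr str1.toList str2.toList str1.toList.length str2.toList.length := by
  set s := str1.toList with hs
  set t := str2.toList with ht
  set m := s.length with hm
  set n := t.length with hn
  -- the step function of A's inner loop, at row i
  set step : Nat → List (List Int) → Nat → List (List Int) := fun i dp j =>
        if i = 0 then pvSet2 dp i j (j : Int)
        else if j = 0 then pvSet2 dp i j (i : Int)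
        else if s.getD (i - 1) ' ' = t.getD (j - 1) ' ' then
          pvSet2 dp i j (pvGet2 dp (i - 1) (j - 1))
        else
          pvSet2 dp i j (min (min (pvGet2 dp i (j - 1) + 1)
                                  (pvGet2 dp (i - 1) j + 1))
                             (pvGet2 dp (i - 1) (j - 1) + 2)) with hstepdef
  set dp0 : List (List Int) :=
    (List.range (m + 1)).map (fun _ => (List.range (n + 1)).map (fun _ => (0 : Int))) with hdp0
  have hA : get_edit_dis2 str1 str2 =
      pvGet2 ((List.range (m + 1)).foldl
        (fun dp i => (List.range (n + 1)).foldl (step i) dp) dp0) m n := rfl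
  rw [hA]
  have shape0 : dp0.length = m + 1 ∧ ∀ k, k < m + 1 → ((dp0.getD k []).length = n + 1) := by
    constructor
    · simp [hdp0]
    · intro k hk
      simp [hdp0, List.getD, hk]
  -- inner loop lemma
  have inner : ∀ i dp, i < m + 1 →
      (dp.length = m + 1 ∧ (∀ k, k < m + 1 → (dp.getD k []).length = n + 1) ∧
        (∀ i' j, i' < i → j < n + 1 → pvGet2 dp i' j = pvDr s t i' j)) →
      (let dp' := (List.range (n + 1)).foldl (step i) dp
       dp'.length = m + 1 ∧ (∀ k, k < m + 1 → (dp'.getD k []).length = n + 1) ∧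
        (∀ i' j, i' < i + 1 → j < n + 1 → pvGet2 dp' i' j = pvDr s t i' j)) := by
    intro i dp hi hInv
    have H := foldl_range_inv (step i)
      (fun j0 dp' => dp'.length = m + 1 ∧ (∀ k, k < m + 1 → (dp'.getD k []).length = n + 1) ∧
        (∀ i' j, i' < i → j < n + 1 → pvGet2 dp' i' j = pvDr s t i' j) ∧
        (∀ j, j < j0 → pvGet2 dp' i j = pvDr s t i j))
      (n + 1) dp ⟨hInv.1, hInv.2.1, hInv.2.2, by omega⟩ ?_
    · refine ⟨H.1, H.2.1, ?_⟩
      intro i' j hi' hj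
      rcases Nat.lt_succ_iff_lt_or_eq.mp hi' with h | rfl
      · exact H.2.2.1 i' j h hj
      · exact H.2.2.2 j hj
    · -- one inner step
      intro j dp' hj hQ
      obtain ⟨hlen, hrow, hprev, hcur⟩ := hQ
      -- every branch writes pvSet2 dp' i j v with v = pvDr s t i j
      have hset : ∀ v : Int, v = pvDr s t i j →
          (pvSet2 dp' i j v).length = m + 1 ∧
          (∀ k, k < m + 1 → ((pvSet2 dp' i j v).getD k []).length = n + 1) ∧
          (∀ i' j', i' < i → j' < n + 1 → pvGet2 (pvSet2 dp' i j v) i' j' = pvDr s t i' j') ∧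
          (∀ j', j' < j + 1 → pvGet2 (pvSet2 dp' i j v) i j' = pvDr s t i j') := by
        intro v hv
        refine ⟨by rw [pvSet2_length]; exact hlen,
                fun k hk => by rw [pvSet2_rowlen]; exact hrow k hk, ?_, ?_⟩
        · intro i' j' hi' hj'
          rw [pvGet2_set_ne_row _ _ _ _ _ _ (by omega)]
          exact hprev i' j' hi' hj'
        · intro j' hj'
          rcases Nat.lt_succ_iff_lt_or_eq.mp hj' with h | rfl
          · rw [pvGet2_set_ne_col _ _ _ _ _ (by omega)]
            exact hcur j' h
          · rw [pvGet2_set_self _ _ _ _ (by omega) (by rw [hrow i hi]; omega), hv]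
      by_cases hi0 : i = 0
      · subst hi0
        simp only [hstepdef, if_pos rfl]
        exact hset _ (by rw [pvDr_zero_left s t j (by omega)])
      · by_cases hj0 : j = 0
        · subst hj0
          simp only [hstepdef, if_neg hi0]
          exact hset _ (by rw [pvDr_zero_right s t i (by omega)])
        · obtain ⟨i', rfl⟩ : ∃ i', i = i' + 1 := ⟨i - 1, by omega⟩
          obtain ⟨j', rfl⟩ : ∃ j', j = j' + 1 := ⟨j - 1, by omega⟩
          have hi' : i' < m := by omega
          have hj' : j' < n := by omega
          have hgs : s.getD (i' + 1 - 1) ' ' = s[i'] := by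
            simp [List.getD, List.getElem?_eq_getElem hi']
          have hgt : t.getD (j' + 1 - 1) ' ' = t[j'] := by
            simp [List.getD, List.getElem?_eq_getElem hj']
          by_cases hc : s[i'] = t[j']
          · simp only [hstepdef, if_neg hi0, if_neg hj0, hgs, hgt, if_pos hc]
            refine hset _ ?_
            rw [pvDr_succ_succ s t i' j' hi' hj', if_pos hc]
            exact hprev i' j' (by omega) (by omega)
          · simp only [hstepdef, if_neg hi0, if_neg hj0, hgs, hgt, if_neg hc]
            refine hset _ ?_
            rw [pvDr_succ_succ s t i' j' hi' hj', if_neg hc]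
            have e1 : pvGet2 dp' (i' + 1) (j' + 1 - 1) = pvDr s t (i' + 1) j' :=
              hcur j' (by omega)
            have e2 : pvGet2 dp' (i' + 1 - 1) (j' + 1) = pvDr s t i' (j' + 1) :=
              hprev i' (j' + 1) (by omega) (by omega)
            have e3 : pvGet2 dp' (i' + 1 - 1) (j' + 1 - 1) = pvDr s t i' j' :=
              hprev i' j' (by omega) (by omega)
            simp only [Nat.add_sub_cancel] at e1 e2 e3 ⊢
            rw [e1, e2, e3]
  have H := foldl_range_inv (fun dp i => (List.range (n + 1)).foldl (step i) dp)
    (fun i0 dp => dp.length = m + 1 ∧ (∀ k, k < m + 1 → (dp.getD k []).length = n + 1) ∧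
      ∀ i j, i < i0 → j < n + 1 → pvGet2 dp i j = pvDr s t i j)
    (m + 1) dp0 ⟨shape0.1, shape0.2, by omega⟩
    (fun i dp hi hP => inner i dp hi ⟨hP.1, hP.2.1, hP.2.2⟩)
  exact H.2.2 m n (by omega) (by omega)

theorem portB_eq (str1 str2 : String) :
    get_edit_dis2_alt str1 str2 =
      (str1.toList.length : Int) + (str2.toList.length : Int) -
        2 * pvLr str1.toList str2.toList str1.toList.length str2.toList.length := by
  set s := str1.toList with hs
  set t := str2.toList with ht
  set m := s.length with hm
  set n := t.length with hn
  set rowStep : List Int → Char → List Int := fun prev c =>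
      (List.foldl (fun (p : Int × List Int) dd =>
          (if c = dd.1 then dd.2.1 + 1 else max p.1 dd.2.2,
           p.2 ++ [if c = dd.1 then dd.2.1 + 1 else max p.1 dd.2.2]))
        ((0 : Int), ([0] : List Int)) (t.zip (prev.zip prev.tail))).2 with hrowStep
  have hB : get_edit_dis2_alt str1 str2 =
      (m : Int) + (n : Int) - 2 * (s.foldl rowStep (List.replicate (n + 1) (0 : Int))).getLastD 0 := rfl
  rw [hB]
  have key : s.foldl rowStep (List.replicate (n + 1) (0 : Int)) =
      (List.range (n + 1)).map (fun j => pvLr s t m j) := by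
    have H := foldl_idx_inv s rowStep
      (fun k prev => prev = (List.range (n + 1)).map (fun j => pvLr s t k j))
      (List.replicate (n + 1) (0 : Int)) ?_ ?_
    · exact H
    · -- base: row 0 is all zeros
      have : ∀ j, pvLr s t 0 j = 0 := fun j => pvLr_zero_left s t j
      simp [this, List.map_const']
    · -- step: row k to row k+1
      intro k prev hk hprev
      subst hprev
      set g : Nat → Int := fun j => pvLr s t k j with hg
      set g' : Nat → Int := fun j => pvLr s t (k + 1) j with hg'
      set prev := (List.range (n + 1)).map g with hprevdef
      set z := t.zip (prev.zip prev.tail) with hz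
      have hprevlen : prev.length = n + 1 := by simp [hprevdef]
      have hzlen : z.length = n := by simp [hz, hprevlen]; omega
      have hzget : ∀ (j : Nat) (hj : j < n),
          z[j]'(by omega) = (t[j]'(by omega), (g j, g (j + 1))) := by
        intro j hj
        simp [hz, hprevdef, List.getElem_zip, List.getElem_tail]
      have H2 := foldl_idx_inv z
        (fun (p : Int × List Int) dd =>
          (if s[k] = dd.1 then dd.2.1 + 1 else max p.1 dd.2.2,
           p.2 ++ [if s[k] = dd.1 then dd.2.1 + 1 else max p.1 dd.2.2]))
        (fun j p => p.1 = g' j ∧ p.2 = (List.range (j + 1)).map g')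
        ((0 : Int), ([0] : List Int))
        ⟨by simp [hg', pvLr_zero_right], by simp [hg', pvLr_zero_right, List.range_succ]⟩
        ?_
      · rw [hzlen] at H2
        show (List.foldl _ ((0 : Int), ([0] : List Int)) z).2 = _
        exact H2.2
      · intro j p hj hQ
        have hjn : j < n := by omega
        rw [hzget j hjn]
        have hval : (if s[k] = t[j]'(by rw [← hn]; omega) then g j + 1 else max p.1 (g (j + 1))) = g' (j + 1) := by
          rw [hQ.1]
          simp only [hg, hg']
          exact (pvLr_succ_succ s t k j hk hjn).symm
        refine ⟨?_, ?_⟩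
        · show (if s[k] = t[j]'(by rw [← hn]; omega) then g j + 1 else max p.1 (g (j + 1))) = g' (j + 1)
          exact hval
        · show p.2 ++ [if s[k] = t[j]'(by rw [← hn]; omega) then g j + 1 else max p.1 (g (j + 1))] = _
          rw [hQ.2, hval, List.range_succ (n := j + 1), List.map_append]
          simp
  rw [key]
  have : ((List.range (n + 1)).map (fun j => pvLr s t m j)).getLastD 0 = pvLr s t m n := by
    rw [List.range_succ, List.map_append]
    simp
  rw [this]

theorem get_edit_dis2_eq_alt (str1 str2 : String) :
    get_edit_dis2 str1 str2 = get_edit_dis2_alt str1 str2 := by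
  rw [portA_eq, portB_eq]
  simp only [pvDr, pvLr, List.take_length]
  rw [pvE_eq_lengths_sub_two_pvL (str1.toList.reverse.length + str2.toList.reverse.length) _ _ rfl]
  simp

-- ===== VERDICT (by name: the statement is the Claim_ definition above) =====
theorem get_edit_dis2_spec : Claim_equal_get_edit_dis2 :=
  fun str1 str2 _ => get_edit_dis2_eq_alt str1 str2
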